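-- pv_equiv track=rewrite | github.com/hendraet/ptm-visualization | protein_sequencing/data_preprocessing/ms_Fragger_reader.py | get_exact_indexes
-- ===== SOURCE A (Python) =====
-- def get_exact_indexes(mod_sequence: str) -> list:
--     indexes = []
--     current_index = 1
--     inside_brackets = False
--     for i, char in enumerate(mod_sequence):
--         if char == '[':
--             inside_brackets = True
--         elif char == ']':
--             inside_brackets = False
--         elif not inside_brackets and char.isalpha():
--             if i + 1 < len(mod_sequence) and mod_sequence[i + 1] == '[':
--                 indexes.append(current_index)
--         if not inside_brackets:
--             current_index += 1
--
--     return indexes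
-- ===== SOURCE B (Python) =====
-- def get_exact_indexes(mod_sequence: str) -> list:
--     indexes = []
--     pos = 1
--     i = 0
--     n = len(mod_sequence)
--     while i < n:
--         char = mod_sequence[i]
--         if char == '[':
--             close = mod_sequence.find(']', i)
--             if close == -1:
--                 return indexes
--             i = close + 1
--             pos += 1
--         else:
--             if char.isalpha() and i + 1 < n and mod_sequence[i + 1] == '[':
--                 indexes.append(pos)
--             i += 1
--             pos += 1
--     return indexes
-- ===== Notes on version B (the rewrite author's own statement) =====
-- stated objective: alternative
-- what changed: Replaces the per-character state machine with an inside_brackets flag by a skip-scan: at each opening bracket it jumps directly past the next closing bracket with str.find (returning early if there is none), so no bracket flag is maintained and bracket contents are never inspected character by character.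
import Mathlib
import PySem

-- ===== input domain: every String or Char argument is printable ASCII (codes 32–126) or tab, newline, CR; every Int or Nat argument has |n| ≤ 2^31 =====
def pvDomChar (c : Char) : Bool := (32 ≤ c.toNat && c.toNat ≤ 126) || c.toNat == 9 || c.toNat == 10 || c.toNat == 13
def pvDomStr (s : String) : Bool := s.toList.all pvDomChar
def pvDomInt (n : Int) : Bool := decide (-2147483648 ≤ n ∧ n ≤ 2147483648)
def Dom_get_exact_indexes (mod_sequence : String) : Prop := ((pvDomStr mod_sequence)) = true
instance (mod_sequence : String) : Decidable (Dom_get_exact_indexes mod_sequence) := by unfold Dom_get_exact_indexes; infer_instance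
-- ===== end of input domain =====

-- B replaces A's per-character inside_brackets state machine by a skip-scan that
-- jumps past each bracket block in one step (objective: alternative decomposition).


-- ===== PORT A =====
-- A's for-loop as structural recursion over the characters; the only use A makes of
-- the enumeration index i is the lookahead mod_sequence[i+1], which is rest.head?.
def pvALoop : List Char → List Int → Int → Bool → List Int
  | [], indexes, _, _ => indexes
  | c :: rest, indexes, current_index, inside_brackets =>
    if c = '[' then
      pvALoop rest indexes current_index true
    else if c = ']' then
      pvALoop rest indexes (current_index + 1) false
    else if inside_brackets then
      pvALoop rest indexes current_index true
    else
      pvALoop rest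
        (if PySem.Chars.isalpha c ∧ rest.head? = some '[' then indexes ++ [current_index]
         else indexes)
        (current_index + 1) false

def get_exact_indexes (mod_sequence : String) : List Int :=
  pvALoop mod_sequence.toList [] 1 false

-- ===== PORT B =====
-- B's while-loop with the find-based jump: s.find(']', i) = dropWhile (· ≠ ']') on the rest.
def pvBLoop : List Char → List Int → Int → List Int
  | [], indexes, _ => indexes
  | c :: rest, indexes, pos =>
    if c = '[' then
      match h : rest.dropWhile (· ≠ ']') with
      | [] => indexes
      | _ :: tail => pvBLoop tail indexes (pos + 1)
    else
      pvBLoop rest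
        (if PySem.Chars.isalpha c ∧ rest.head? = some '[' then indexes ++ [pos]
         else indexes)
        (pos + 1)
termination_by cs _ _ => cs.length
decreasing_by
  · have h1 : (rest.dropWhile (· ≠ ']')).length ≤ rest.length := List.length_dropWhile_le _ _
    simp only [h, List.length_cons] at h1
    simp only [List.length_cons]; omega
  · simp [List.length_cons]

def get_exact_indexes_alt (mod_sequence : String) : List Int :=
  pvBLoop mod_sequence.toList [] 1

-- ===== PRECONDITION & SPEC =====
def Spec_get_exact_indexes (mod_sequence : String) (out : List Int) : Prop := out = get_exact_indexes_alt mod_sequence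
instance (mod_sequence : String) (out : List Int) : Decidable (Spec_get_exact_indexes mod_sequence out) := by unfold Spec_get_exact_indexes; infer_instance

-- ===== CLAIM (what is proved, stated in full; the proofs are below) =====
def Claim_equal_get_exact_indexes : Prop := ∀ (mod_sequence : String), Dom_get_exact_indexes mod_sequence → Spec_get_exact_indexes mod_sequence (get_exact_indexes mod_sequence)

-- ===== LEMMAS AND PROOFS =====

-- Inside brackets, A ignores everything up to (and including) the next ']', only
-- bumping current_index at the ']'; i.e. A's inside state is B's dropWhile jump.
theorem pvALoop_inside (cs : List Char) : ∀ (indexes : List Int) (ci : Int),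
    pvALoop cs indexes ci true =
      match cs.dropWhile (· ≠ ']') with
      | [] => indexes
      | _ :: tail => pvALoop tail indexes (ci + 1) false := by
  induction cs with
  | nil => intro indexes ci; simp [pvALoop]
  | cons c rest ih =>
    intro indexes ci
    by_cases hc : c = ']'
    · subst hc; simp [pvALoop, List.dropWhile]
    · have : (c ≠ ']') = true := by simp [hc]
      by_cases hb : c = '['
      · subst hb
        simp only [pvALoop]
        rw [ih]
        simp [List.dropWhile, hc]
      · simp only [pvALoop, if_neg hb, if_neg hc]
        rw [ih]
        simp [List.dropWhile, hc]

theorem pvALoop_eq_pvBLoop : ∀ (n : Nat) (cs : List Char), cs.length ≤ n →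
    ∀ (indexes : List Int) (pos : Int),
    pvALoop cs indexes pos false = pvBLoop cs indexes pos := by
  intro n
  induction n with
  | zero =>
    intro cs hlen indexes pos
    have : cs = [] := List.length_eq_zero_iff.mp (Nat.le_zero.mp hlen)
    subst this; simp [pvALoop, pvBLoop]
  | succ m ih =>
    intro cs hlen indexes pos
    match cs with
    | [] => simp [pvALoop, pvBLoop]
    | c :: rest =>
      by_cases hb : c = '['
      · subst hb
        simp only [pvALoop, pvBLoop]
        rw [pvALoop_inside]
        cases h : rest.dropWhile (· ≠ ']') with
        | nil => rfl
        | cons d tail =>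
          have h1 : (rest.dropWhile (· ≠ ']')).length ≤ rest.length :=
            List.length_dropWhile_le _ _
          rw [h] at h1
          simp only [List.length_cons] at h1 hlen
          exact ih tail (by omega) indexes (pos + 1)
      · have hlen' : rest.length ≤ m := by simp at hlen; omega
        by_cases hc : c = ']'
        · subst hc
          have e1 : pvALoop (']' :: rest) indexes pos false
              = pvALoop rest indexes (pos + 1) false := by
            simp [pvALoop]
          have e2 : pvBLoop (']' :: rest) indexes pos
              = pvBLoop rest indexes (pos + 1) := by
            simp [pvBLoop, (by decide : PySem.Chars.isalpha ']' = false)]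
          rw [e1, e2]
          exact ih rest hlen' indexes (pos + 1)
        · simp only [pvALoop, pvBLoop, if_neg hb, if_neg hc, Bool.false_eq_true, if_false]
          exact ih rest hlen' _ (pos + 1)

-- ===== VERDICT (by name: the statement is the Claim_ definition above) =====
theorem get_exact_indexes_spec : Claim_equal_get_exact_indexes := by
  intro s _
  unfold Spec_get_exact_indexes get_exact_indexes get_exact_indexes_alt
  exact pvALoop_eq_pvBLoop s.toList.length s.toList le_rfl [] 1
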